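-- pv_equiv track=rewrite | github.com/SaFD-00/MobileGPT-V2 | Server/graphs/nodes/explore_action_node.py | _find_nearest_unexplored
-- ===== SOURCE A (Python) =====
-- from typing import Any, Dict, List, Optional, Tuple
--
-- def _find_nearest_unexplored(
--     current_page: int,
--     unexplored_subtasks: Dict,
--     subtask_graph: Dict,
--     back_edges: Dict
-- ) -> Tuple[Optional[int], Optional[dict], List]:
--     """Find nearest unexplored subtask using BFS.
--
--     Returns:
--         Tuple of (page_index, subtask_info, path)
--     """
--     # Check current page first
--     if current_page in unexplored_subtasks and unexplored_subtasks[current_page]: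
--         return current_page, unexplored_subtasks[current_page][0], []
--
--     # BFS from current page
--     from collections import deque
--
--     queue = deque([(current_page, [])])
--     visited = {current_page}
--
--     while queue:
--         page, path = queue.popleft()
--
--         # Check this page
--         if page in unexplored_subtasks and unexplored_subtasks[page]:
--             return page, unexplored_subtasks[page][0], path
--
--         # Add neighbors
--         for next_page, subtask_name in subtask_graph.get(page, []):
--             if next_page not in visited:
--                 visited.add(next_page)
--                 queue.append((next_page, path + [(next_page, "forward", subtask_name)]))
--
--         for next_page in back_edges.get(page, []):
--             if next_page not in visited:
--                 visited.add(next_page)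
--                 queue.append((next_page, path + [(next_page, "back", None)]))
--
--     return None, None, []
-- ===== SOURCE B (Python) =====
-- def _find_nearest_unexplored(current_page, unexplored_subtasks, subtask_graph, back_edges):
--     """BFS over bare page indices with a parent/edge back-pointer dict (which doubles
--     as the visited set); the path is reconstructed once, at the found page."""
--     from collections import deque
--     parent = {current_page: None}  # page -> (previous page, edge taken) | None for the root
--     queue = deque([current_page])
--     while queue:
--         page = queue.popleft()
--         if unexplored_subtasks.get(page):
--             edges = []
--             node = page
--             while parent[node] is not None:
--                 node, edge = parent[node]
--                 edges.append(edge)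
--             edges.reverse()
--             return page, unexplored_subtasks[page][0], edges
--         neighbors = [(p, (p, "forward", name)) for p, name in subtask_graph.get(page, [])]
--         neighbors += [(p, (p, "back", None)) for p in back_edges.get(page, [])]
--         for p, edge in neighbors:
--             if p not in parent:
--                 parent[p] = (page, edge)
--                 queue.append(p)
--     return None, None, []
-- ===== Notes on version B (the rewrite author's own statement) =====
-- stated objective: alternative
-- what changed: B's BFS queue holds bare page indices plus a parent/edge back-pointer dict (which replaces both the visited set and A's per-entry path lists); the path is reconstructed once by walking back-pointers from the found page, instead of A's copying of the whole path into every enqueued entry, and the two neighbour loops are merged into one pass over a combined edge list.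
import Mathlib
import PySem

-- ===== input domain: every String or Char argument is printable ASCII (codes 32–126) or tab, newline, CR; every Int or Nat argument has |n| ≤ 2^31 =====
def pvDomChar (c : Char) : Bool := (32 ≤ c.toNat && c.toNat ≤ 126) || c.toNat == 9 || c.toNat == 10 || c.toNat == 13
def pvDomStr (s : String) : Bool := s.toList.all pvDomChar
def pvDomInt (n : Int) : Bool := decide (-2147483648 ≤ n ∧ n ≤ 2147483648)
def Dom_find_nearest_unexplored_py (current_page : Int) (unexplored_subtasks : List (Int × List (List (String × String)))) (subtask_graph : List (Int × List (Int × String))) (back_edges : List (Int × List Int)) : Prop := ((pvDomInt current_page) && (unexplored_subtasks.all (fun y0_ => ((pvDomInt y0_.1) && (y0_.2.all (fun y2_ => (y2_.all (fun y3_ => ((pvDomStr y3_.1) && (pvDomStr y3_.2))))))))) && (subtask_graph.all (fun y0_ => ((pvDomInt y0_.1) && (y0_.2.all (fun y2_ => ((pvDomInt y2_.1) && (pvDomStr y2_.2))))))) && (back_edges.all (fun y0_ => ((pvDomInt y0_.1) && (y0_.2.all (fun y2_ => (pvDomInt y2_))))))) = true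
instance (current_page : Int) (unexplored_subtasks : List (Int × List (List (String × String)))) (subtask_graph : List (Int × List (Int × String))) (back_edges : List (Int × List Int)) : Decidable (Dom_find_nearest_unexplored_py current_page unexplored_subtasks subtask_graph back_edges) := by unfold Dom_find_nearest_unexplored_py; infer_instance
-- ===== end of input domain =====

-- B replaces A's per-entry path copies and visited set by a parent/edge back-pointer
-- dict over a queue of bare page indices, reconstructing the path once at the found page.


-- ===== PORT A =====
-- BFS loop of A: queue entries carry their full path; fuel (1 + total edge count) is a
-- totality guard only — each iteration pops an entry enqueued exactly once.
def pvA_loop (un : PySem.Dict Int (List (List (String × String))))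
    (gd : PySem.Dict Int (List (Int × String))) (bed : PySem.Dict Int (List Int)) :
    Nat → List (Int × List (Int × String × Option String)) → PySem.Set Int →
    Option Int × (Option (List (String × String))) × (List (Int × String × Option String))
  | 0, _, _ => (none, none, [])
  | _ + 1, [], _ => (none, none, [])
  | fuel + 1, (page, path) :: rest, visited =>
    match PySem.Dict.get? un page with
    | some (info :: _) => (some page, some info, path)
    | _ =>
      let s1 := (PySem.Dict.getD gd page []).foldl
        (fun (st : List (Int × List (Int × String × Option String)) × PySem.Set Int) e =>
          if st.2.contains e.1 then st
          else (st.1 ++ [(e.1, path ++ [(e.1, "forward", some e.2)])], st.2.add e.1))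
        (rest, visited)
      let s2 := (PySem.Dict.getD bed page []).foldl
        (fun (st : List (Int × List (Int × String × Option String)) × PySem.Set Int) np =>
          if st.2.contains np then st
          else (st.1 ++ [(np, path ++ [(np, "back", none)])], st.2.add np))
        s1
      pvA_loop un gd bed fuel s2.1 s2.2

def find_nearest_unexplored_py (current_page : Int) (unexplored_subtasks : List (Int × List (List (String × String)))) (subtask_graph : List (Int × List (Int × String))) (back_edges : List (Int × List Int)) : Option Int × (Option (List (String × String))) × (List (Int × String × Option String)) :=
  -- if current_page in unexplored_subtasks and unexplored_subtasks[current_page]: return (…, …, [])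
  match PySem.Dict.get? (PySem.Dict.ofList unexplored_subtasks) current_page with
  | some (info :: _) => (some current_page, some info, [])
  | _ =>
    pvA_loop (PySem.Dict.ofList unexplored_subtasks) (PySem.Dict.ofList subtask_graph) (PySem.Dict.ofList back_edges)
      (1 + (subtask_graph.map (fun kv => kv.2.length)).sum + (back_edges.map (fun kv => kv.2.length)).sum)
      [(current_page, [])] (PySem.Set.add PySem.Set.empty current_page)

-- ===== PORT B =====
-- while parent[node] is not None: node, edge = parent[node]; edges.append(edge)
-- fuel (= size of the parent dict) is a totality guard only: the back-pointer chain
-- visits distinct keys of the dict; the KeyError/`None` cases both end the walk here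
-- (a missing key is unreachable in B's runs).
def pvB_walk (parent : PySem.Dict Int (Option (Int × (Int × String × Option String)))) :
    Nat → Int → List (Int × String × Option String) → List (Int × String × Option String)
  | 0, _, acc => acc
  | f + 1, node, acc =>
    match PySem.Dict.get? parent node with
    | some (some pe) => pvB_walk parent f pe.1 (acc ++ [pe.2])
    | _ => acc

-- neighbors = [(p, (p,"forward",name)) …] + [(p, (p,"back",None)) …]
def pvB_neighbors (gd : PySem.Dict Int (List (Int × String))) (bed : PySem.Dict Int (List Int)) (page : Int) : List (Int × (Int × String × Option String)) :=
  (PySem.Dict.getD gd page []).map (fun e => (e.1, (e.1, "forward", some e.2)))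
    ++ (PySem.Dict.getD bed page []).map (fun np => (np, (np, "back", (none : Option String))))

-- BFS over bare pages; the parent dict doubles as the visited set.
-- fuel (1 + total edge count) is a totality guard only, as in A's loop.
def pvB_loop (un : PySem.Dict Int (List (List (String × String))))
    (gd : PySem.Dict Int (List (Int × String))) (bed : PySem.Dict Int (List Int)) :
    Nat → List Int → PySem.Dict Int (Option (Int × (Int × String × Option String))) →
    Option Int × (Option (List (String × String))) × (List (Int × String × Option String))
  | 0, _, _ => (none, none, [])
  | _ + 1, [], _ => (none, none, [])
  | fuel + 1, page :: rest, parent =>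
    match PySem.Dict.getD un page [] with
    | info :: _ =>
      (some page, some info, (pvB_walk parent (PySem.Dict.size parent) page []).reverse)
    | [] =>
      let st := (pvB_neighbors gd bed page).foldl
        (fun (st : List Int × PySem.Dict Int (Option (Int × (Int × String × Option String)))) pe =>
          if (PySem.Dict.get? st.2 pe.1).isSome then st
          else (st.1 ++ [pe.1], st.2.insert pe.1 (some (page, pe.2))))
        (rest, parent)
      pvB_loop un gd bed fuel st.1 st.2

def find_nearest_unexplored_py_alt (current_page : Int) (unexplored_subtasks : List (Int × List (List (String × String)))) (subtask_graph : List (Int × List (Int × String))) (back_edges : List (Int × List Int)) : Option Int × (Option (List (String × String))) × (List (Int × String × Option String)) :=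
  pvB_loop (PySem.Dict.ofList unexplored_subtasks) (PySem.Dict.ofList subtask_graph) (PySem.Dict.ofList back_edges)
    (1 + (subtask_graph.map (fun kv => kv.2.length)).sum + (back_edges.map (fun kv => kv.2.length)).sum)
    [current_page] (PySem.Dict.insert PySem.Dict.empty current_page none)

-- ===== PRECONDITION & SPEC =====
def Spec_find_nearest_unexplored_py (current_page : Int) (unexplored_subtasks : List (Int × List (List (String × String)))) (subtask_graph : List (Int × List (Int × String))) (back_edges : List (Int × List Int)) (out : Option Int × (Option (List (String × String))) × (List (Int × String × Option String))) : Prop := out = find_nearest_unexplored_py_alt current_page unexplored_subtasks subtask_graph back_edges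
instance (current_page : Int) (unexplored_subtasks : List (Int × List (List (String × String)))) (subtask_graph : List (Int × List (Int × String))) (back_edges : List (Int × List Int)) (out : Option Int × (Option (List (String × String))) × (List (Int × String × Option String))) : Decidable (Spec_find_nearest_unexplored_py current_page unexplored_subtasks subtask_graph back_edges out) := by unfold Spec_find_nearest_unexplored_py; infer_instance

-- ===== CLAIM (what is proved, stated in full; the proofs are below) =====
def Claim_equal_find_nearest_unexplored_py : Prop := ∀ (current_page : Int) (unexplored_subtasks : List (Int × List (List (String × String)))) (subtask_graph : List (Int × List (Int × String))) (back_edges : List (Int × List Int)), Dom_find_nearest_unexplored_py current_page unexplored_subtasks subtask_graph back_edges → Spec_find_nearest_unexplored_py current_page unexplored_subtasks subtask_graph back_edges (find_nearest_unexplored_py current_page unexplored_subtasks subtask_graph back_edges)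

-- ===== LEMMAS AND PROOFS =====

-- pvChain parent page rp: walking the back-pointers from `page` reads off exactly the
-- edges rp (the path reversed) and ends at the root.
def pvChain (parent : PySem.Dict Int (Option (Int × (Int × String × Option String)))) :
    Int → List (Int × String × Option String) → Prop
  | page, [] => PySem.Dict.get? parent page = some none
  | page, e :: rp => ∃ prev, PySem.Dict.get? parent page = some (some (prev, e)) ∧ pvChain parent prev rp

theorem pv_walk_of_chain (parent : PySem.Dict Int (Option (Int × (Int × String × Option String))))
    (rp : List (Int × String × Option String)) :
    ∀ (page : Int) (acc : List (Int × String × Option String)) (f : Nat),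
    pvChain parent page rp → rp.length + 1 ≤ f →
    pvB_walk parent f page acc = acc ++ rp := by
  induction rp with
  | nil =>
    intro page acc f h hf
    have h' : PySem.Dict.get? parent page = some none := h
    match f, hf with
    | f + 1, _ => simp [pvB_walk, h']
  | cons e rp ih =>
    intro page acc f h hf
    obtain ⟨prev, hget, hch⟩ := h
    match f, hf with
    | f + 1, hf =>
      have : pvB_walk parent (f + 1) page acc = pvB_walk parent f prev (acc ++ [e]) := by
        simp [pvB_walk, hget]
      rw [this, ih prev (acc ++ [e]) f hch (by simpa using Nat.lt_succ_iff.mp hf)]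
      simp

theorem pv_chain_insert (parent : PySem.Dict Int (Option (Int × (Int × String × Option String))))
    (np : Int) (x : Option (Int × (Int × String × Option String)))
    (hnp : PySem.Dict.get? parent np = none)
    (rp : List (Int × String × Option String)) :
    ∀ page : Int, pvChain parent page rp → pvChain (parent.insert np x) page rp := by
  induction rp with
  | nil =>
    intro page h
    have h' : PySem.Dict.get? parent page = some none := h
    have hne : page ≠ np := by intro he; rw [he, hnp] at h'; simp at h'
    show PySem.Dict.get? (parent.insert np x) page = some none
    rw [PySem.Dict.get?_insert_of_ne _ _ hne]; exact h'
  | cons e rp ih =>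
    intro page h
    obtain ⟨prev, hget, hch⟩ := h
    have hne : page ≠ np := by intro he; rw [he, hnp] at hget; simp at hget
    exact ⟨prev, by rw [PySem.Dict.get?_insert_of_ne _ _ hne]; exact hget, ih prev hch⟩

-- simulation of the per-page expansion: A appends (page, full path) entries to its
-- queue and marks visited; B appends bare pages and records back-pointers.
theorem pv_fold_sim (page : Int) (path : List (Int × String × Option String)) :
    ∀ (l : List (Int × (Int × String × Option String)))
      (qA : List (Int × List (Int × String × Option String))) (qB : List Int)
      (v : PySem.Set Int) (parent : PySem.Dict Int (Option (Int × (Int × String × Option String)))),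
    qB = qA.map Prod.fst →
    (∀ pe ∈ qA, pvChain parent pe.1 pe.2.reverse ∧ pe.2.length + 1 ≤ PySem.Dict.size parent) →
    (∀ x : Int, v.contains x = (PySem.Dict.get? parent x).isSome) →
    pvChain parent page path.reverse →
    path.length + 1 ≤ PySem.Dict.size parent →
    (let A := l.foldl (fun (st : List (Int × List (Int × String × Option String)) × PySem.Set Int) pe =>
        if st.2.contains pe.1 then st
        else (st.1 ++ [(pe.1, path ++ [pe.2])], st.2.add pe.1)) (qA, v);
     let B := l.foldl (fun (st : List Int × PySem.Dict Int (Option (Int × (Int × String × Option String)))) pe =>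
        if (PySem.Dict.get? st.2 pe.1).isSome then st
        else (st.1 ++ [pe.1], st.2.insert pe.1 (some (page, pe.2)))) (qB, parent);
     B.1 = A.1.map Prod.fst ∧
     (∀ pe ∈ A.1, pvChain B.2 pe.1 pe.2.reverse ∧ pe.2.length + 1 ≤ PySem.Dict.size B.2) ∧
     (∀ x : Int, A.2.contains x = (PySem.Dict.get? B.2 x).isSome) ∧
     pvChain B.2 page path.reverse ∧
     path.length + 1 ≤ PySem.Dict.size B.2) := by
  intro l
  induction l with
  | nil =>
    intro qA qB v parent hq hinv hvis hpage hsize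
    exact ⟨hq, hinv, hvis, hpage, hsize⟩
  | cons pe l ih =>
    intro qA qB v parent hq hinv hvis hpage hsize
    simp only [List.foldl_cons]
    cases hg : (PySem.Dict.get? parent pe.1).isSome with
    | true =>
      have hc : v.contains pe.1 = true := by rw [hvis]; exact hg
      simp only [hc, if_pos]
      exact ih qA qB v parent hq hinv hvis hpage hsize
    | false =>
      have hnone : PySem.Dict.get? parent pe.1 = none := by
        cases h : PySem.Dict.get? parent pe.1 with
        | none => rfl
        | some y => rw [h] at hg; simp at hg
      have hc : v.contains pe.1 = false := by rw [hvis, hg]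
      simp only [hc, Bool.false_eq_true, if_neg, not_false_iff]
      have hcontains : parent.contains pe.1 = false := by
        rw [PySem.Dict.contains_eq_isSome_get?, hnone]; rfl
      have hsize' : PySem.Dict.size (parent.insert pe.1 (some (page, pe.2))) = PySem.Dict.size parent + 1 := by
        rw [PySem.Dict.size_insert, hcontains]; simp
      apply ih
      · simp [hq]
      · intro qe hqe
        rcases List.mem_append.mp hqe with hqe | hqe
        · obtain ⟨h1, h2⟩ := hinv qe hqe
          exact ⟨pv_chain_insert parent pe.1 _ hnone _ _ h1, by omega⟩
        · have hqe : qe = (pe.1, path ++ [pe.2]) := by simpa using hqe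
          subst hqe
          refine ⟨?_, by simp; omega⟩
          show pvChain _ pe.1 (path ++ [pe.2]).reverse
          rw [List.reverse_append, List.reverse_singleton, List.singleton_append]
          exact ⟨page, PySem.Dict.get?_insert_self _ _ _, pv_chain_insert parent pe.1 _ hnone _ _ hpage⟩
      · intro x
        by_cases hx : x = pe.1
        · subst hx
          have hmem : pe.1 ∉ v := by simpa using hc
          simp [hmem, PySem.Dict.get?_insert_self]
        · have : (PySem.Set.add v pe.1).contains x = v.contains x := by
            simp [PySem.Set.add_eq_ite]
            split
            · rfl
            · simp
              intro h; exact absurd h hx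
          rw [this, hvis, PySem.Dict.get?_insert_of_ne _ _ hx]
      · exact pv_chain_insert parent pe.1 _ hnone _ _ hpage
      · omega

-- A's two concrete expansion folds ARE the generic pair-fold over pvB_neighbors.
theorem pvA_expand_eq (gd : PySem.Dict Int (List (Int × String))) (bed : PySem.Dict Int (List Int))
    (page : Int) (path : List (Int × String × Option String))
    (qA : List (Int × List (Int × String × Option String))) (v : PySem.Set Int) :
    ((PySem.Dict.getD bed page []).foldl
      (fun (st : List (Int × List (Int × String × Option String)) × PySem.Set Int) np =>
        if st.2.contains np then st
        else (st.1 ++ [(np, path ++ [(np, "back", none)])], st.2.add np))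
      ((PySem.Dict.getD gd page []).foldl
        (fun (st : List (Int × List (Int × String × Option String)) × PySem.Set Int) e =>
          if st.2.contains e.1 then st
          else (st.1 ++ [(e.1, path ++ [(e.1, "forward", some e.2)])], st.2.add e.1))
        (qA, v)))
    = (pvB_neighbors gd bed page).foldl
      (fun (st : List (Int × List (Int × String × Option String)) × PySem.Set Int) pe =>
        if st.2.contains pe.1 then st
        else (st.1 ++ [(pe.1, path ++ [pe.2])], st.2.add pe.1)) (qA, v) := by
  rw [pvB_neighbors, List.foldl_append, List.foldl_map, List.foldl_map]

-- the queue-level simulation: same fuel, same pop order.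
theorem pv_sim (un : PySem.Dict Int (List (List (String × String))))
    (gd : PySem.Dict Int (List (Int × String))) (bed : PySem.Dict Int (List Int)) :
    ∀ (f : Nat) (qA : List (Int × List (Int × String × Option String))) (qB : List Int)
      (v : PySem.Set Int) (parent : PySem.Dict Int (Option (Int × (Int × String × Option String)))),
    qB = qA.map Prod.fst →
    (∀ pe ∈ qA, pvChain parent pe.1 pe.2.reverse ∧ pe.2.length + 1 ≤ PySem.Dict.size parent) →
    (∀ x : Int, v.contains x = (PySem.Dict.get? parent x).isSome) →
    pvB_loop un gd bed f qB parent = pvA_loop un gd bed f qA v := by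
  intro f
  induction f with
  | zero => intro qA qB v parent hq _ _; subst hq; simp [pvA_loop, pvB_loop]
  | succ f ih =>
    intro qA qB v parent hq hinv hvis
    match qA, hq with
    | [], hq => subst hq; simp [pvA_loop, pvB_loop]
    | (page, path) :: rest, hq =>
      subst hq
      simp only [List.map_cons]
      rw [pvA_loop, pvB_loop]
      obtain ⟨hch, hlen⟩ := hinv (page, path) (List.mem_cons_self)
      cases hu : PySem.Dict.get? un page with
      | some l =>
        cases l with
        | cons info t =>
          have hgd : PySem.Dict.getD un page [] = info :: t := PySem.Dict.getD_of_get?_eq_some _ _ hu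
          rw [hgd]
          simp only
          rw [pv_walk_of_chain parent path.reverse page [] (PySem.Dict.size parent) hch (by simpa using hlen)]
          simp
        | nil =>
          have hgd : PySem.Dict.getD un page [] = [] := PySem.Dict.getD_of_get?_eq_some _ _ hu
          rw [hgd]
          simp only
          rw [pvA_expand_eq]
          have := pv_fold_sim page path (pvB_neighbors gd bed page) rest (rest.map Prod.fst) v parent rfl
            (fun pe hpe => hinv pe (List.mem_cons_of_mem _ hpe)) hvis hch hlen
          obtain ⟨h1, h2, h3, _, _⟩ := this
          exact ih _ _ _ _ h1 h2 h3
      | none =>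
        have hgd : PySem.Dict.getD un page [] = [] := PySem.Dict.getD_of_get?_eq_none _ _ hu
        rw [hgd]
        simp only
        rw [pvA_expand_eq]
        have := pv_fold_sim page path (pvB_neighbors gd bed page) rest (rest.map Prod.fst) v parent rfl
          (fun pe hpe => hinv pe (List.mem_cons_of_mem _ hpe)) hvis hch hlen
        obtain ⟨h1, h2, h3, _, _⟩ := this
        exact ih _ _ _ _ h1 h2 h3

-- ===== VERDICT (by name: the statement is the Claim_ definition above) =====
theorem find_nearest_unexplored_py_spec : Claim_equal_find_nearest_unexplored_py := by
  intro cp un g be _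
  show find_nearest_unexplored_py cp un g be = find_nearest_unexplored_py_alt cp un g be
  unfold find_nearest_unexplored_py find_nearest_unexplored_py_alt
  have hf : 1 + (g.map (fun kv => kv.2.length)).sum + (be.map (fun kv => kv.2.length)).sum
      = ((g.map (fun kv => kv.2.length)).sum + (be.map (fun kv => kv.2.length)).sum) + 1 := by omega
  have hsz : PySem.Dict.size (PySem.Dict.insert PySem.Dict.empty cp (none : Option (Int × (Int × String × Option String)))) = 1 := by
    rw [PySem.Dict.size_insert]
    simp [PySem.Dict.contains_empty, PySem.Dict.size_empty]
  have hroot : PySem.Dict.get? (PySem.Dict.insert PySem.Dict.empty cp (none : Option (Int × (Int × String × Option String)))) cp = some none :=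
    PySem.Dict.get?_insert_self _ _ _
  cases hu : PySem.Dict.get? (PySem.Dict.ofList un) cp with
  | some l =>
    cases l with
    | cons info t =>
      have hgd : PySem.Dict.getD (PySem.Dict.ofList un) cp [] = info :: t :=
        PySem.Dict.getD_of_get?_eq_some _ _ hu
      rw [hf, pvB_loop, hgd]
      simp only
      rw [hsz]
      have : pvB_walk (PySem.Dict.insert PySem.Dict.empty cp none) 1 cp [] = [] := by
        simp [pvB_walk, hroot]
      rw [this]
      simp
    | nil =>
      rw [hf]
      apply (pv_sim _ _ _ _ [(cp, [])] [cp] _ _ rfl ?_ ?_).symm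
      · intro pe hpe
        have hpe : pe = (cp, []) := by simpa using hpe
        subst hpe
        exact ⟨hroot, by simp [hsz]⟩
      · intro x
        by_cases hx : x = cp
        · subst hx; simp [PySem.Set.add, PySem.Set.empty, hroot]
        · simp [PySem.Set.add, PySem.Set.empty, PySem.Dict.get?_insert_of_ne _ _ hx, PySem.Dict.get?_empty, hx]
  | none =>
    rw [hf]
    apply (pv_sim _ _ _ _ [(cp, [])] [cp] _ _ rfl ?_ ?_).symm
    · intro pe hpe
      have hpe : pe = (cp, []) := by simpa using hpe
      subst hpe
      exact ⟨hroot, by simp [hsz]⟩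
    · intro x
      by_cases hx : x = cp
      · subst hx; simp [PySem.Set.add, PySem.Set.empty, hroot]
      · simp [PySem.Set.add, PySem.Set.empty, PySem.Dict.get?_insert_of_ne _ _ hx, PySem.Dict.get?_empty, hx]
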